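-- pv_equiv track=rewrite | github.com/gustavo-hrm/Analysing-PCAP-Pyshark | detection_scoring.py | _classify_detection
-- ===== SOURCE A (Python) =====
-- CONFIDENCE_THRESHOLDS = {
--     'CONFIRMED_C2': 80,      # High confidence C2 detection
--     'LIKELY_C2': 65,         # Probable C2, warrants investigation
--     'NEEDS_REVIEW': 45,      # Suspicious but requires analyst review
--     'SUSPICIOUS': 30,        # Low confidence, may be legitimate
--     'BENIGN': 0,            # Appears legitimate
-- }
--
-- def _classify_detection(score, evidence):
--     """Classify detection based on score and evidence quality"""
--     # Check for strong indicators
--     strong_indicators = [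
--         'known_c2_ip', 'known_c2_domain', 'malicious_ja3',
--         'botnet_signature', 'known_exploit_pattern'
--     ]
--
--     has_strong_evidence = any(
--         e['indicator'] in strong_indicators for e in evidence
--     )
--
--     # Classification logic
--     if score >= CONFIDENCE_THRESHOLDS['CONFIRMED_C2'] and has_strong_evidence:
--         return 'CONFIRMED_C2'
--     elif score >= CONFIDENCE_THRESHOLDS['LIKELY_C2']:
--         return 'LIKELY_C2'
--     elif score >= CONFIDENCE_THRESHOLDS['NEEDS_REVIEW']:
--         return 'NEEDS_REVIEW'
--     elif score >= CONFIDENCE_THRESHOLDS['SUSPICIOUS']: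
--         return 'SUSPICIOUS'
--     else:
--         return 'BENIGN'
-- ===== SOURCE B (Python) =====
-- # B: arithmetic rank instead of a branch cascade — count how many thresholds the
-- # score clears, demote rank 4 to 3 when strong evidence is absent, index a label
-- # tuple; the strong-evidence scan runs only when the top rank is reached.
-- _STRONG = frozenset({
--     'known_c2_ip', 'known_c2_domain', 'malicious_ja3',
--     'botnet_signature', 'known_exploit_pattern'
-- })
-- _LABELS = ('BENIGN', 'SUSPICIOUS', 'NEEDS_REVIEW', 'LIKELY_C2', 'CONFIRMED_C2')
--
-- def _classify_detection(score, evidence):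
--     idx = sum(score >= t for t in (30, 45, 65, 80))
--     if idx == 4 and not any(e['indicator'] in _STRONG for e in evidence):
--         idx = 3
--     return _LABELS[idx]
-- ===== Notes on version B (the rewrite author's own statement) =====
-- stated objective: alternative
-- what changed: Computes an arithmetic rank (count of thresholds cleared) and indexes a label tuple, demoting rank 4 when strong evidence is absent, instead of A's if/elif cascade; the strong-evidence scan runs only when the top rank is reached.
import Mathlib
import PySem

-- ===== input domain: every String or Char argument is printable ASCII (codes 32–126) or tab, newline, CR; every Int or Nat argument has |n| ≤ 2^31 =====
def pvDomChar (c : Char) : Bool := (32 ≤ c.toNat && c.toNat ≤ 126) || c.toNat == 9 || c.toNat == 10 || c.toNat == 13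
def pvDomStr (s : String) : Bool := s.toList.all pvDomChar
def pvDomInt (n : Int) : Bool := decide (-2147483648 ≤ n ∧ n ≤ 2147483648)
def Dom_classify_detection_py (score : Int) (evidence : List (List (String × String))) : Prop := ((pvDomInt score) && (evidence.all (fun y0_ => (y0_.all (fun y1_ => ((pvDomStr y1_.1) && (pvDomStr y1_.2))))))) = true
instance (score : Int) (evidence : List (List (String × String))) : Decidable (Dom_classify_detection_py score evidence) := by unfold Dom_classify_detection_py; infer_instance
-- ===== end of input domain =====

-- B replaces A's if/elif cascade by an arithmetic rank (count of thresholds cleared)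
-- indexing a label table, with the strong-evidence scan run only at the top rank;
-- objective: alternative decomposition (not faster).

-- ===== PORT A =====
-- strong_indicators list
def pvStrongIndicators : List String :=
  ["known_c2_ip", "known_c2_domain", "malicious_ja3", "botnet_signature", "known_exploit_pattern"]

-- e['indicator'] raises KeyError when the key is missing; Pre_ excludes those inputs,
-- so the total form `.getD ""` is exact on Pre_ ("" is never a strong indicator).
def classify_detection_py (score : Int) (evidence : List (List (String × String))) : String :=
  let has_strong_evidence :=
    evidence.any (fun e => pvStrongIndicators.contains (((PySem.Dict.mk e).get? "indicator").getD ""))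
  if 80 ≤ score ∧ has_strong_evidence = true then "CONFIRMED_C2"
  else if 65 ≤ score then "LIKELY_C2"
  else if 45 ≤ score then "NEEDS_REVIEW"
  else if 30 ≤ score then "SUSPICIOUS"
  else "BENIGN"

-- ===== PORT B =====
def pvStrongSet : PySem.Set String :=
  PySem.Set.ofList ["known_c2_ip", "known_c2_domain", "malicious_ja3", "botnet_signature", "known_exploit_pattern"]

def pvLabels : List String :=
  ["BENIGN", "SUSPICIOUS", "NEEDS_REVIEW", "LIKELY_C2", "CONFIRMED_C2"]

def classify_detection_py_alt (score : Int) (evidence : List (List (String × String))) : String :=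
  -- idx = sum(score >= t for t in (30, 45, 65, 80))
  let idx : Int := ([30, 45, 65, 80] : List Int).foldl (fun acc t => acc + (if t ≤ score then 1 else 0)) 0
  -- e['indicator'] raises KeyError outside Pre_; the total form `.getD ""` is exact on Pre_.
  let idx := if idx = 4 ∧ evidence.any (fun e => PySem.Set.contains pvStrongSet (((PySem.Dict.mk e).get? "indicator").getD "")) = false then 3 else idx
  -- _LABELS[idx]; idx is always 0..4 so the default is unreachable
  ((PySem.List.pyGet? pvLabels idx).getD "")

-- ===== PRECONDITION & SPEC =====
-- Pre_ excludes exactly the inputs where A raises KeyError: a dict without an 'indicator'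
-- key that is not preceded by a strong-indicator dict (any() short-circuits on those).
def Pre_classify_detection_py (score : Int) (evidence : List (List (String × String))) : Prop :=
  ∀ i ∈ List.range evidence.length,
    ((evidence[i]!).map Prod.fst).contains "indicator" = false →
      ∃ j ∈ List.range i,
        pvStrongIndicators.contains (((PySem.Dict.mk (evidence[j]!)).get? "indicator").getD "") = true
instance (score : Int) (evidence : List (List (String × String))) : Decidable (Pre_classify_detection_py score evidence) := by unfold Pre_classify_detection_py; infer_instance

def pvWitness_classify_detection_py : Int × (List (List (String × String))) :=
  (70, [[("indicator", "known_c2_ip")], [("indicator", "dns_tunnel")]])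

def Spec_classify_detection_py (score : Int) (evidence : List (List (String × String))) (out : String) : Prop := out = classify_detection_py_alt score evidence
instance (score : Int) (evidence : List (List (String × String))) (out : String) : Decidable (Spec_classify_detection_py score evidence out) := by unfold Spec_classify_detection_py; infer_instance

-- ===== CLAIM (what is proved, stated in full; the proofs are below) =====
def Claim_equal_classify_detection_py : Prop := ∀ (score : Int) (evidence : List (List (String × String))), Dom_classify_detection_py score evidence → Pre_classify_detection_py score evidence → Spec_classify_detection_py score evidence (classify_detection_py score evidence)


-- ===== LEMMAS AND PROOFS =====

-- the two per-dict strong-indicator tests agree on every input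
lemma strong_elem_eq (e : List (String × String)) :
    pvStrongIndicators.contains (((PySem.Dict.mk e).get? "indicator").getD "")
      = PySem.Set.contains pvStrongSet (((PySem.Dict.mk e).get? "indicator").getD "") := by
  have h : pvStrongSet = pvStrongIndicators := by decide
  rw [h]; rfl

-- ===== VERDICT (by name: the statement is the Claim_ definition above) =====
theorem classify_detection_py_spec : Claim_equal_classify_detection_py := by
  intro score evidence _ _
  show classify_detection_py score evidence = classify_detection_py_alt score evidence
  unfold classify_detection_py classify_detection_py_alt
  simp only [strong_elem_eq]
  set b := evidence.any (fun e => PySem.Set.contains pvStrongSet (((PySem.Dict.mk e).get? "indicator").getD "")) with hb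
  clear hb
  cases b <;> simp only [List.foldl] <;> split_ifs <;> first | rfl | decide | omega | simp_all
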